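-- pv_equiv track=rewrite | github.com/shepherdjay/advent_of_code | advent_of_code/2025/02/advent_2025day02.py | find_invalids
-- ===== SOURCE A (Python) =====
-- def is_invalid(n: int) -> bool:
--     n = str(n)
--     if len(n) % 2 != 0:
--         return False
--     first_part, second_part = n[: len(n) // 2], n[len(n) // 2 :]
--     return first_part == second_part
--
-- def is_invalid_p2(n: int) -> bool:
--     n = str(n)
--     for i in range(1, len(n)):
--         if len(n) % i != 0:
--             continue
--         chunk = n[:i]
--         if n == chunk * (len(n) // i):
--             return True
--     else:
--         return False
--
-- def find_invalids(start: int, stop: int, part2: bool = False) -> list[int]: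
--     invalids = []
--     for n in range(start, stop + 1):
--         if not part2 and is_invalid(n):
--             invalids.append(n)
--         elif part2 and is_invalid_p2(n):
--             invalids.append(n)
--     return invalids
-- ===== SOURCE B (Python) =====
-- def find_invalids(start: int, stop: int, part2: bool = False) -> list[int]:
--     # Enumerate repeated-chunk numbers directly (chunk value times a "repunit"
--     # multiplier) instead of testing every integer in the range.
--     found = set()
--     if stop >= 10:
--         top_len = len(str(stop))
--         for length in range(2, top_len + 1):
--             for d in range(1, length):
--                 if length % d != 0:
--                     continue
--                 if not part2 and length != 2 * d:
--                     continue
--                 reps = length // d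
--                 mult = sum(10 ** (d * j) for j in range(reps))
--                 for c in range(10 ** (d - 1), 10 ** d):
--                     v = c * mult
--                     if start <= v <= stop:
--                         found.add(v)
--     return sorted(found)
-- ===== Notes on version B (the rewrite author's own statement) =====
-- stated objective: faster
-- what changed: Instead of testing every integer in [start, stop] by string-chunk comparison, B directly generates every repeated-chunk number as chunk_value * repunit_multiplier for each digit length up to len(str(stop)), keeps those inside the bounds in a set, and returns them sorted.
import Mathlib
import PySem

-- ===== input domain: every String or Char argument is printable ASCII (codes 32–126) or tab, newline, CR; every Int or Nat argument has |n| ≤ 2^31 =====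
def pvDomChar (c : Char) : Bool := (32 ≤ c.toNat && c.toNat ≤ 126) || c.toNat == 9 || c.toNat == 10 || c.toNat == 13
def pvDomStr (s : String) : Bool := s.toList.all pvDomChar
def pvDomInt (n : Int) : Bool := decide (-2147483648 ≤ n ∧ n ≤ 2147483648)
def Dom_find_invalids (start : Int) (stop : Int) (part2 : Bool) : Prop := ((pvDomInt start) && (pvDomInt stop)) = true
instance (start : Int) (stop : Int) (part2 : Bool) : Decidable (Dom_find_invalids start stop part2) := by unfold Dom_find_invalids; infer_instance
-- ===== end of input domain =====

-- B enumerates the repeated-chunk numbers directly (chunk value times a repunit multiplier)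
-- and sorts them, instead of A's scan of every integer in the range: asymptotically faster.


-- ===== PORT A =====
-- Python string multiplication  chunk * k

def pvStrMul (cs : List Char) (k : Int) : List Char :=
  (List.replicate k.toNat cs).flatten

def pvIsInvalid (n : Int) : Bool :=
  let s := PySem.Int.toChars n
  if PySem.Int.mod (PySem.Chars.len s) 2 ≠ 0 then false
  else
    let h := PySem.Int.floordiv (PySem.Chars.len s) 2
    PySem.List.slice s none (some h) == PySem.List.slice s (some h) none

def pvIsInvalidP2 (n : Int) : Bool :=
  let s := PySem.Int.toChars n
  let L := PySem.Chars.len s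
  (PySem.List.pyRange 1 L 1).any (fun i =>
    if PySem.Int.mod L i ≠ 0 then false
    else s == pvStrMul (PySem.List.slice s none (some i)) (PySem.Int.floordiv L i))

def find_invalids (start : Int) (stop : Int) (part2 : Bool) : List Int :=
  (PySem.List.pyRange start (stop + 1) 1).foldl
    (fun invalids n =>
      if !part2 && pvIsInvalid n then invalids ++ [n]
      else if part2 && pvIsInvalidP2 n then invalids ++ [n]
      else invalids) []

-- ===== PORT B =====
-- mult = sum(10**(d*j) for j in range(reps))

-- ===== B side =====
def pvRepMult (d : Int) (reps : Int) : Int :=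
  ((PySem.List.pyRange 0 reps 1).map (fun j => (10 : Int) ^ (d * j).toNat)).sum

def find_invalids_alt (start : Int) (stop : Int) (part2 : Bool) : List Int :=
  let found : PySem.Set Int :=
    if 10 ≤ stop then
      let topLen := PySem.Chars.len (PySem.Int.toChars stop)
      (PySem.List.pyRange 2 (topLen + 1) 1).foldl (fun f length =>
        (PySem.List.pyRange 1 length 1).foldl (fun f d =>
          if PySem.Int.mod length d ≠ 0 then f
          else if !part2 && length ≠ 2 * d then f
          else
            let reps := PySem.Int.floordiv length d
            let mult := pvRepMult d reps
            (PySem.List.pyRange ((10 : Int) ^ (d - 1).toNat) ((10 : Int) ^ d.toNat) 1).foldl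
              (fun f c =>
                if start ≤ c * mult ∧ c * mult ≤ stop then PySem.Set.add f (c * mult) else f) f) f)
        PySem.Set.empty
    else PySem.Set.empty
  PySem.List.sorted found (fun x => x) false

-- ===== PRECONDITION & SPEC =====
def Spec_find_invalids (start : Int) (stop : Int) (part2 : Bool) (out : List Int) : Prop := out = find_invalids_alt start stop part2
instance (start : Int) (stop : Int) (part2 : Bool) (out : List Int) : Decidable (Spec_find_invalids start stop part2 out) := by unfold Spec_find_invalids; infer_instance

-- ===== CLAIM (what is proved, stated in full; the proofs are below) =====
def Claim_equal_find_invalids : Prop := ∀ (start : Int) (stop : Int) (part2 : Bool), Dom_find_invalids start stop part2 → Spec_find_invalids start stop part2 (find_invalids start stop part2)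

-- ===== LEMMAS AND PROOFS =====

theorem pvDigitChar_ne_dash (x : Nat) : Nat.digitChar x ≠ '-' := by
  match x with
  | 0 | 1 | 2 | 3 | 4 | 5 | 6 | 7 | 8 | 9 | 10 | 11 | 12 | 13 | 14 | 15 => decide
  | (n+16) =>
    show (if n + 16 = 0 then '0' else _) ≠ '-'
    rw [if_neg (by omega), if_neg (by omega), if_neg (by omega), if_neg (by omega),
        if_neg (by omega), if_neg (by omega), if_neg (by omega), if_neg (by omega),
        if_neg (by omega), if_neg (by omega), if_neg (by omega), if_neg (by omega),
        if_neg (by omega), if_neg (by omega), if_neg (by omega), if_neg (by omega)]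
    decide

theorem pvToDigitsCore_eq (n : Nat) : ∀ (f : Nat) (ds : List Char), 0 < n → n < f →
    Nat.toDigitsCore 10 f n ds = ((Nat.digits 10 n).map Nat.digitChar).reverse ++ ds := by
  induction n using Nat.strong_induction_on with
  | _ n ih =>
    intro f ds hn hf
    match f with
    | f + 1 =>
      rw [Nat.toDigitsCore]
      rw [Nat.digits_def' (by norm_num : (1:Nat) < 10) hn]
      by_cases h : n / 10 = 0
      · simp only [h, if_pos, Nat.digits_zero]
        simp
      · simp only [h]
        rw [ih (n / 10) (Nat.div_lt_self hn (by norm_num)) f _ (Nat.pos_of_ne_zero h) (by omega)]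
        simp

theorem pvToDigits_eq {n : Nat} (h : 0 < n) :
    Nat.toDigits 10 n = ((Nat.digits 10 n).map Nat.digitChar).reverse := by
  rw [Nat.toDigits, pvToDigitsCore_eq n (n + 1) [] h (Nat.lt_succ_self n), List.append_nil]

def pvRepu (d r : Nat) : Nat := ((List.range r).map (fun j => 10 ^ (d * j))).sum

theorem pvRepu_succ (d r : Nat) : pvRepu d (r + 1) = 1 + 10 ^ d * pvRepu d r := by
  unfold pvRepu
  rw [List.range_succ_eq_map]
  simp only [List.map_cons, List.map_map, List.sum_cons, Function.comp_def, Nat.mul_zero,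
    pow_zero]
  rw [← List.sum_map_mul_left]
  congr 1
  apply congrArg
  apply List.map_congr_left
  intro a _
  rw [← pow_add]
  congr 1
  rw [Nat.succ_eq_add_one, Nat.mul_add, Nat.mul_one, Nat.add_comm]

theorem pvLenIff (c i : Nat) (hi : 1 ≤ i) :
    (Nat.digits 10 c).length = i ↔ 10 ^ (i - 1) ≤ c ∧ c < 10 ^ i := by
  have hsub : i - 1 + 1 = i := Nat.sub_add_cancel hi
  constructor
  · intro h
    have hc : c ≠ 0 := by
      rintro rfl; simp at h; omega
    rw [Nat.length_digits 10 c (by norm_num) hc] at h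
    have hlog : Nat.log 10 c = i - 1 := by omega
    refine ⟨?_, ?_⟩
    · rw [← hlog]; exact Nat.pow_log_le_self 10 hc
    · have hlt := Nat.lt_pow_succ_log_self (by norm_num : 1 < 10) c
      rw [hlog] at hlt
      calc c < 10 ^ (i - 1 + 1) := hlt
        _ = 10 ^ i := by rw [hsub]
  · rintro ⟨h1, h2⟩
    have hc : c ≠ 0 := by
      have : 0 < 10 ^ (i - 1) := by positivity
      omega
    rw [Nat.length_digits 10 c (by norm_num) hc]
    have hlog : Nat.log 10 c = i - 1 := Nat.log_eq_of_pow_le_of_lt_pow h1 (by rw [hsub]; exact h2)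
    omega

theorem pvFlattenRep_comm {α : Type} (r : Nat) (xs : List α) :
    (List.replicate r xs).flatten ++ xs = xs ++ (List.replicate r xs).flatten := by
  induction r with
  | zero => simp
  | succ r ih => simp only [List.replicate_succ, List.flatten_cons, List.append_assoc, ih]

theorem pvFlattenRep_reverse {α : Type} (r : Nat) (xs : List α) :
    ((List.replicate r xs).flatten).reverse = (List.replicate r xs.reverse).flatten := by
  induction r with
  | zero => simp
  | succ r ih =>
    simp only [List.replicate_succ, List.flatten_cons, List.reverse_append, ih]
    rw [← pvFlattenRep_comm]

theorem pvFlattenRep_take {α : Type} {r : Nat} (hr : 1 ≤ r) (xs : List α) :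
    ((List.replicate r xs).flatten).take xs.length = xs := by
  obtain ⟨r', rfl⟩ : ∃ r', r = r' + 1 := ⟨r - 1, by omega⟩
  rw [List.replicate_succ, List.flatten_cons, List.take_append_of_le_length le_rfl]
  simp

theorem pvFlattenRep_getLast? {α : Type} {r : Nat} (hr : 1 ≤ r) (xs : List α) :
    ((List.replicate r xs).flatten).getLast? = xs.getLast? := by
  induction r with
  | zero => omega
  | succ r ih =>
    rw [List.replicate_succ, List.flatten_cons, List.getLast?_append]
    rcases Nat.eq_zero_or_pos r with rfl | hr'
    · simp
    · rw [ih hr']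
      rcases xs.eq_nil_or_concat with rfl | ⟨ys, a, rfl⟩
      · simp
      · simp

theorem pvCount_flattenRep (r : Nat) (xs : List Char) (a : Char) :
    ((List.replicate r xs).flatten).count a = r * xs.count a := by
  induction r with
  | zero => simp
  | succ r ih => simp [List.replicate_succ, List.count_append, ih]; ring

theorem pvDigitChar_inj : ∀ a < 10, ∀ b < 10, Nat.digitChar a = Nat.digitChar b → a = b := by
  decide

theorem pvMapDigitChar_inj : ∀ (xs ys : List Nat), (∀ x ∈ xs, x < 10) → (∀ y ∈ ys, y < 10) →
    xs.map Nat.digitChar = ys.map Nat.digitChar → xs = ys := by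
  intro xs
  induction xs with
  | nil => intro ys _ _ h; cases ys <;> simp_all
  | cons x t ih =>
    intro ys hx hy h
    cases ys with
    | nil => simp at h
    | cons y s =>
      simp only [List.map_cons, List.cons.injEq] at h
      have hxy : x = y := pvDigitChar_inj x (hx x (by simp)) y (hy y (by simp)) h.1
      rw [hxy, ih s (fun a ha => hx a (by simp [ha])) (fun a ha => hy a (by simp [ha])) h.2]

theorem pvDigRep (c d : Nat) (hc : (Nat.digits 10 c).length = d) :
    ∀ r, Nat.digits 10 (c * pvRepu d r) = (List.replicate r (Nat.digits 10 c)).flatten := by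
  intro r
  induction r with
  | zero => simp [pvRepu]
  | succ r ih =>
    have h : c * pvRepu d (r + 1) = c + 10 ^ d * (c * pvRepu d r) := by
      rw [pvRepu_succ]; ring
    rw [h, List.replicate_succ, List.flatten_cons, ← ih, ← hc,
      Nat.digits_append_digits (by norm_num)]

theorem pvFlattenRep_mem {α : Type} {r : Nat} {xs : List α} {y : α}
    (h : y ∈ (List.replicate r xs).flatten) : y ∈ xs := by
  simp only [List.mem_flatten] at h
  obtain ⟨l, hl, hy⟩ := h
  rw [List.eq_of_mem_replicate hl] at hy; exact hy

theorem pvRepIff (n i : Nat) (hn : 0 < n) (hi : 1 ≤ i)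
    (hiL : i ≤ (Nat.digits 10 n).length) (hdvd : i ∣ (Nat.digits 10 n).length) :
    (((Nat.digits 10 n).map Nat.digitChar).reverse =
       (List.replicate ((Nat.digits 10 n).length / i)
         ((((Nat.digits 10 n).map Nat.digitChar).reverse).take i)).flatten)
    ↔ ∃ c, (Nat.digits 10 c).length = i ∧ n = c * pvRepu i ((Nat.digits 10 n).length / i) := by
  set ds := Nat.digits 10 n with hds
  set L := ds.length with hL
  set r := L / i with hr
  have hr1 : 1 ≤ r := Nat.one_le_div_iff (by omega) |>.mpr hiL
  have hLri : L = r * i := by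
    rw [hr, Nat.div_mul_cancel hdvd]
  constructor
  · intro heq
    set S := (ds.map Nat.digitChar).reverse with hS
    have hSlen : S.length = L := by simp [hS, hL]
    set chunk := S.take i with hchunk
    have hchunklen : chunk.length = i := by
      rw [hchunk, List.length_take, hSlen]; omega
    have hrev : S.reverse = ds.map Nat.digitChar := by simp [hS]
    have h2 : ds.map Nat.digitChar = (List.replicate r chunk.reverse).flatten := by
      rw [← hrev, heq, pvFlattenRep_reverse]
    have htake : chunk.reverse = (ds.take i).map Nat.digitChar := by
      have hpre : (List.replicate r chunk.reverse).flatten.take i = chunk.reverse := by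
        have h3 := pvFlattenRep_take hr1 chunk.reverse
        rwa [List.length_reverse, hchunklen] at h3
      rw [← hpre, ← h2, ← List.map_take]
    have h3 : ds.map Nat.digitChar = ((List.replicate r (ds.take i)).flatten).map Nat.digitChar := by
      rw [h2, htake]
      simp [List.map_flatten, List.map_replicate]
    have hdsq : ds = (List.replicate r (ds.take i)).flatten := by
      apply pvMapDigitChar_inj _ _ ?_ ?_ h3
      · intro x hx; exact Nat.digits_lt_base (by norm_num) (hds ▸ hx)
      · intro y hy
        have hmem : y ∈ ds.take i := pvFlattenRep_mem hy
        exact Nat.digits_lt_base (by norm_num) (hds ▸ List.mem_of_mem_take hmem)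
    set bs := ds.take i with hbs
    have hbslen : bs.length = i := by rw [hbs, List.length_take]; omega
    have hbsne : bs ≠ [] := by
      intro h; rw [h] at hbslen; simp at hbslen; omega
    have hdsne : ds ≠ [] := Nat.digits_ne_nil_iff_ne_zero.mpr (by omega)
    have hlast : bs.getLast hbsne ≠ 0 := by
      have hgl : ds.getLast? = bs.getLast? := by
        rw [hdsq]; exact pvFlattenRep_getLast? hr1 bs
      have h1 := Nat.getLast_digit_ne_zero 10 (m := n) (by omega)
      rw [List.getLast?_eq_some_getLast hdsne, List.getLast?_eq_some_getLast hbsne] at hgl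
      intro hc
      apply h1
      have h4 : ds.getLast hdsne = bs.getLast hbsne := Option.some.inj hgl
      exact h4.trans hc
    have hdigc : Nat.digits 10 (Nat.ofDigits 10 bs) = bs :=
      Nat.digits_ofDigits 10 (by norm_num) bs
        (fun l hl => Nat.digits_lt_base (by norm_num) (hds ▸ List.mem_of_mem_take hl))
        (fun _ => hlast)
    refine ⟨Nat.ofDigits 10 bs, by rw [hdigc, hbslen], ?_⟩
    have h5 := pvDigRep (Nat.ofDigits 10 bs) i (by rw [hdigc, hbslen]) r
    rw [hdigc, ← hdsq] at h5
    calc n = Nat.ofDigits 10 (Nat.digits 10 n) := (Nat.ofDigits_digits 10 n).symm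
      _ = Nat.ofDigits 10 (Nat.digits 10 (Nat.ofDigits 10 bs * pvRepu i r)) := by rw [← hds, h5]
      _ = Nat.ofDigits 10 bs * pvRepu i r := Nat.ofDigits_digits 10 _
  · rintro ⟨c, hclen, hceq⟩
    have hdsrep : ds = (List.replicate r (Nat.digits 10 c)).flatten := by
      rw [hds, hceq, pvDigRep c i hclen r]
    have htake : ((ds.map Nat.digitChar).reverse).take i
        = ((Nat.digits 10 c).map Nat.digitChar).reverse := by
      rw [hdsrep]
      rw [List.map_flatten, List.map_replicate, pvFlattenRep_reverse]
      have hlen : (((Nat.digits 10 c).map Nat.digitChar).reverse).length = i := by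
        simp [hclen]
      rw [← hlen]
      exact pvFlattenRep_take hr1 _
    rw [htake, hdsrep, List.map_flatten, List.map_replicate, pvFlattenRep_reverse]

def pvGoodN (part2 : Bool) (v : Int) : Prop :=
  ∃ d r c : Nat, 1 ≤ d ∧ 2 ≤ r ∧ (part2 = false → r = 2) ∧
    10 ^ (d - 1) ≤ c ∧ c < 10 ^ d ∧ v = ((c * pvRepu d r : Nat) : Int)

-- for r ≥ 2, d ≥ 1 the repunit is at least 11
theorem pvRepu_ge {d r : Nat} (hd : 1 ≤ d) (hr : 2 ≤ r) : 11 ≤ pvRepu d r := by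
  obtain ⟨r', rfl⟩ : ∃ r', r = r' + 2 := ⟨r - 2, by omega⟩
  rw [pvRepu_succ, pvRepu_succ]
  have h10 : 10 ≤ 10 ^ d := by
    calc 10 = 10 ^ 1 := (pow_one 10).symm
    _ ≤ 10 ^ d := Nat.pow_le_pow_right (by norm_num) hd
  have h1 : 1 ≤ 1 + 10 ^ d * pvRepu d r' := by omega
  calc 11 = 1 + 10 * 1 := by norm_num
    _ ≤ 1 + 10 ^ d * (1 + 10 ^ d * pvRepu d r') := by
        exact Nat.add_le_add_left (Nat.mul_le_mul h10 h1) 1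

theorem pvGoodN_eleven_le {p : Bool} {v : Int} (h : pvGoodN p v) : 11 ≤ v := by
  obtain ⟨d, r, c, hd, hr, _, hc1, _, hveq⟩ := h
  have hc : 1 ≤ c := by
    have : 0 < 10 ^ (d - 1) := by positivity
    omega
  have : 11 ≤ c * pvRepu d r := by
    calc 11 = 1 * 11 := by norm_num
    _ ≤ c * pvRepu d r := Nat.mul_le_mul hc (pvRepu_ge hd hr)
  rw [hveq]; exact_mod_cast this

theorem pvFlattenRep_length {α : Type} (r : Nat) (xs : List α) :
    ((List.replicate r xs).flatten).length = r * xs.length := by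
  induction r with
  | zero => simp
  | succ r ih => simp [List.replicate_succ, ih]; ring

-- unpacking pvGoodN over naturals
theorem pvGoodN_nat {p : Bool} {m : Nat} (h : pvGoodN p (m : Int)) :
    ∃ d r c : Nat, 1 ≤ d ∧ 2 ≤ r ∧ (p = false → r = 2) ∧ (Nat.digits 10 c).length = d ∧
      m = c * pvRepu d r ∧ (Nat.digits 10 m).length = r * d := by
  obtain ⟨d, r, c, hd, hr, hp, hc1, hc2, hveq⟩ := h
  have hm : m = c * pvRepu d r := by exact_mod_cast hveq
  have hclen : (Nat.digits 10 c).length = d := (pvLenIff c d hd).mpr ⟨hc1, hc2⟩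
  refine ⟨d, r, c, hd, hr, hp, hclen, hm, ?_⟩
  rw [hm, pvDigRep c d hclen r, pvFlattenRep_length, hclen]

theorem pvGoodN_intro {p : Bool} {m d r c : Nat} (hd : 1 ≤ d) (hr : 2 ≤ r)
    (hp : p = false → r = 2) (hclen : (Nat.digits 10 c).length = d)
    (hm : m = c * pvRepu d r) : pvGoodN p (m : Int) := by
  obtain ⟨h1, h2⟩ := (pvLenIff c d hd).mp hclen
  exact ⟨d, r, c, hd, hr, hp, h1, h2, by exact_mod_cast hm⟩

-- positive-case characterizations
theorem pvIsInvalid_pos (m : Nat) (hm : 0 < m) :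
    pvIsInvalid (m : Int) = true ↔ pvGoodN false (m : Int) := by
  have htc : PySem.Int.toChars (m : Int) = ((Nat.digits 10 m).map Nat.digitChar).reverse := by
    rw [PySem.Int.toChars, if_neg (by omega)]
    simp only [Int.toNat_natCast]
    exact pvToDigits_eq hm
  set S := ((Nat.digits 10 m).map Nat.digitChar).reverse with hS
  set L := (Nat.digits 10 m).length with hLdef
  have hL1 : 1 ≤ L := by
    rw [hLdef]
    have hne : Nat.digits 10 m ≠ [] := Nat.digits_ne_nil_iff_ne_zero.mpr (by omega : m ≠ 0)
    exact List.length_pos_of_ne_nil hne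
  have hSlen : S.length = L := by simp [hS, hLdef]
  rw [pvIsInvalid]
  simp only [htc]
  rw [PySem.Chars.len_eq, hSlen]
  have hmod : PySem.Int.mod (L : Int) 2 = ((L % 2 : Nat) : Int) := by
    exact_mod_cast PySem.Int.mod_natCast L 2
  have hdiv : PySem.Int.floordiv (L : Int) 2 = ((L / 2 : Nat) : Int) := by
    exact_mod_cast PySem.Int.floordiv_natCast L 2
  rw [hmod, hdiv]
  by_cases hpar : L % 2 = 0
  · -- even length
    rw [if_neg (by simp [hpar])]
    rw [PySem.List.slice_to_natCast, PySem.List.slice_from_natCast]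
    set h := L / 2 with hhdef
    have hh1 : 1 ≤ h := by omega
    have hhL : h ≤ L := by omega
    have hL2h : L = 2 * h := by omega
    have hdvd : h ∣ L := ⟨2, by omega⟩
    have hLdivh : L / h = 2 := by
      rw [hL2h, Nat.mul_div_assoc 2 (dvd_refl h), Nat.div_self (by omega : 0 < h)]
    have hiff := pvRepIff m h hm hh1 (by rw [← hLdef]; omega) (by rw [← hLdef]; exact hdvd)
    rw [← hLdef, ← hS, hLdivh] at hiff
    constructor
    · intro hbeq
      have heq : S.take h = S.drop h := eq_of_beq hbeq
      have hrep : S = (List.replicate 2 (S.take h)).flatten := by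
        simp only [List.replicate_succ, List.replicate_zero, List.flatten_cons,
          List.flatten_nil, List.append_nil]
        conv_lhs => rw [← List.take_append_drop h S]
        rw [← heq]
      obtain ⟨c, hclen, hceq⟩ := hiff.mp hrep
      exact pvGoodN_intro hh1 (by norm_num) (fun _ => rfl) hclen hceq
    · intro hgood
      obtain ⟨d, r, c, hd, hr, hp, hclen, hmeq, hLe⟩ := pvGoodN_nat hgood
      have hr2 : r = 2 := hp rfl
      subst hr2
      have hdh : d = h := by omega
      subst hdh
      have hrep := hiff.mpr ⟨c, hclen, hmeq⟩
      have hlen : (S.take h).length = h := by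
        rw [List.length_take, hSlen]; omega
      have hdrop : S.drop h = S.take h := by
        nth_rewrite 1 [hrep]
        simp only [List.replicate_succ, List.replicate_zero, List.flatten_cons,
          List.flatten_nil, List.append_nil]
        rw [List.drop_left' hlen]
      exact beq_iff_eq.mpr hdrop.symm
  · -- odd length: the check is false, and pvGoodN would force an even length
    rw [if_pos (by exact_mod_cast fun hx => hpar (by exact_mod_cast hx))]
    simp only [Bool.false_eq_true, false_iff]
    intro hgood
    obtain ⟨d, r, c, hd, hr, hp, hclen, hmeq, hLe⟩ := pvGoodN_nat hgood
    have hr2 : r = 2 := hp rfl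
    subst hr2
    rw [← hLdef] at hLe
    omega

theorem pvIsInvalidP2_pos (m : Nat) (hm : 0 < m) :
    pvIsInvalidP2 (m : Int) = true ↔ pvGoodN true (m : Int) := by
  have htc : PySem.Int.toChars (m : Int) = ((Nat.digits 10 m).map Nat.digitChar).reverse := by
    rw [PySem.Int.toChars, if_neg (by omega)]
    simp only [Int.toNat_natCast]
    exact pvToDigits_eq hm
  set S := ((Nat.digits 10 m).map Nat.digitChar).reverse with hS
  set L := (Nat.digits 10 m).length with hLdef
  have hL1 : 1 ≤ L := by
    rw [hLdef]
    have hne : Nat.digits 10 m ≠ [] := Nat.digits_ne_nil_iff_ne_zero.mpr (by omega : m ≠ 0)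
    exact List.length_pos_of_ne_nil hne
  have hSlen : S.length = L := by simp [hS, hLdef]
  rw [pvIsInvalidP2]
  simp only [htc]
  rw [PySem.Chars.len_eq, hSlen, List.any_eq_true]
  constructor
  · rintro ⟨i, hmem, hbody⟩
    obtain ⟨hi1, hiL⟩ := PySem.List.mem_pyRange_one.mp hmem
    obtain ⟨iN, rfl⟩ : ∃ iN : Nat, i = (iN : Int) := ⟨i.toNat, (Int.toNat_of_nonneg (by omega)).symm⟩
    have hiN1 : 1 ≤ iN := by exact_mod_cast hi1
    have hiNL : iN < L := by exact_mod_cast hiL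
    rw [PySem.Int.mod_natCast] at hbody
    by_cases hdvd : iN ∣ L
    · rw [if_neg (by simp [Nat.mod_eq_zero_of_dvd hdvd])] at hbody
      have hfd : PySem.Int.floordiv (L : Int) (iN : Int) = ((L / iN : Nat) : Int) := by
        exact_mod_cast PySem.Int.floordiv_natCast L iN
      rw [hfd, PySem.List.slice_to_natCast] at hbody
      have hsm : pvStrMul (S.take iN) ((L / iN : Nat) : Int)
          = (List.replicate (L / iN) (S.take iN)).flatten := by
        rw [pvStrMul, Int.toNat_natCast]
      rw [hsm] at hbody
      have heq := eq_of_beq hbody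
      have hiff := pvRepIff m iN hm hiN1 (by rw [← hLdef]; omega) (by rw [← hLdef]; exact hdvd)
      rw [← hLdef, ← hS] at hiff
      obtain ⟨c, hclen, hceq⟩ := hiff.mp heq
      have hr2 : 2 ≤ L / iN := by
        obtain ⟨q, hq⟩ := hdvd
        have : q ≠ 0 ∧ q ≠ 1 := by constructor <;> rintro rfl <;> omega
        rw [hq, Nat.mul_div_cancel_left _ (by omega : 0 < iN)]
        omega
      exact pvGoodN_intro hiN1 hr2 (fun h => nomatch h) hclen hceq
    · rw [if_pos] at hbody
      · exact absurd hbody (by simp)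
      · have : L % iN ≠ 0 := fun h => hdvd (Nat.dvd_of_mod_eq_zero h)
        exact_mod_cast fun h => this (by exact_mod_cast h)
  · intro hgood
    obtain ⟨d, r, c, hd, hr, _, hclen, hmeq, hLe⟩ := pvGoodN_nat hgood
    rw [← hLdef] at hLe
    have hdL : d < L := by nlinarith
    have hdvd : d ∣ L := ⟨r, by rw [hLe, Nat.mul_comm]⟩
    have hLdr : L / d = r := by
      rw [hLe, Nat.mul_div_assoc r (dvd_refl d), Nat.div_self (by omega : 0 < d), Nat.mul_one]
    refine ⟨(d : Int), PySem.List.mem_pyRange_one.mpr ⟨by exact_mod_cast hd, by exact_mod_cast hdL⟩, ?_⟩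
    rw [PySem.Int.mod_natCast]
    rw [if_neg (by simp [Nat.mod_eq_zero_of_dvd hdvd])]
    have hfd : PySem.Int.floordiv (L : Int) (d : Int) = ((L / d : Nat) : Int) := by
      exact_mod_cast PySem.Int.floordiv_natCast L d
    rw [hfd, PySem.List.slice_to_natCast]
    have hsm : pvStrMul (S.take d) ((L / d : Nat) : Int)
        = (List.replicate (L / d) (S.take d)).flatten := by
      rw [pvStrMul, Int.toNat_natCast]
    rw [hsm]
    have hiff := pvRepIff m d hm hd (by rw [← hLdef]; omega) (by rw [← hLdef]; exact hdvd)
    rw [← hLdef, ← hS, hLdr] at hiff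
    rw [hLdr]
    exact beq_iff_eq.mpr (hiff.mpr ⟨c, hclen, hmeq⟩)

-- negative inputs: the string starts with '-', no repetition is possible
theorem pvDashCount (n : Int) (hn : n < 0) :
    ∃ t : List Char, PySem.Int.toChars n = '-' :: t ∧ t.count '-' = 0 ∧ 1 ≤ t.length := by
  rw [PySem.Int.toChars, if_pos hn]
  refine ⟨Nat.toDigits 10 n.natAbs, rfl, ?_, ?_⟩
  · have hk : 0 < n.natAbs := by omega
    rw [pvToDigits_eq hk, List.count_eq_zero]
    intro hmem
    rw [List.mem_reverse, List.mem_map] at hmem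
    obtain ⟨x, _, hx⟩ := hmem
    exact pvDigitChar_ne_dash x hx
  · have hk : 0 < n.natAbs := by omega
    rw [pvToDigits_eq hk]
    have hne : Nat.digits 10 n.natAbs ≠ [] := Nat.digits_ne_nil_iff_ne_zero.mpr (by omega)
    simp only [List.length_reverse, List.length_map]
    exact List.length_pos_of_ne_nil hne

theorem pvIsInvalid_neg (n : Int) (hn : n < 0) : pvIsInvalid n = false := by
  obtain ⟨t, htc, hcnt, htlen⟩ := pvDashCount n hn
  rw [pvIsInvalid]
  simp only [htc]
  set s := '-' :: t with hsdef
  have hslen : s.length = t.length + 1 := by simp [hsdef]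
  rw [PySem.Chars.len_eq, hslen]
  set LN := t.length + 1 with hLN
  have hmod : PySem.Int.mod (LN : Int) 2 = ((LN % 2 : Nat) : Int) := by
    exact_mod_cast PySem.Int.mod_natCast LN 2
  have hdiv : PySem.Int.floordiv (LN : Int) 2 = ((LN / 2 : Nat) : Int) := by
    exact_mod_cast PySem.Int.floordiv_natCast LN 2
  rw [hmod, hdiv]
  by_cases hpar : LN % 2 = 0
  · rw [if_neg (by simp [hpar])]
    rw [PySem.List.slice_to_natCast, PySem.List.slice_from_natCast]
    set h := LN / 2 with hh
    have hh1 : 1 ≤ h := by omega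
    rw [beq_eq_false_iff_ne]
    intro heq
    have hsplit : (s.take h).count '-' + (s.drop h).count '-' = s.count '-' := by
      rw [← List.count_append, List.take_append_drop]
    have hs1 : s.count '-' = 1 := by
      rw [hsdef, List.count_cons]
      simp [hcnt]
    have htk : 1 ≤ (s.take h).count '-' := by
      obtain ⟨h', hh'⟩ : ∃ h', h = h' + 1 := ⟨h - 1, by omega⟩
      rw [hsdef, hh', List.take_succ_cons, List.count_cons]
      simp
    have hdc : (s.take h).count '-' = (s.drop h).count '-' := by rw [heq]
    omega
  · rw [if_pos (by exact_mod_cast fun hx => hpar (by exact_mod_cast hx))]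

theorem pvIsInvalidP2_neg (n : Int) (hn : n < 0) : pvIsInvalidP2 n = false := by
  obtain ⟨t, htc, hcnt, htlen⟩ := pvDashCount n hn
  rw [pvIsInvalidP2]
  simp only [htc]
  set s := '-' :: t with hsdef
  have hslen : s.length = t.length + 1 := by simp [hsdef]
  rw [PySem.Chars.len_eq, hslen]
  set LN := t.length + 1 with hLN
  rw [List.any_eq_false]
  intro i hmem
  simp only [Bool.not_eq_true]
  obtain ⟨hi1, hiL⟩ := PySem.List.mem_pyRange_one.mp hmem
  obtain ⟨iN, rfl⟩ : ∃ iN : Nat, i = (iN : Int) := ⟨i.toNat, (Int.toNat_of_nonneg (by omega)).symm⟩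
  have hiN1 : 1 ≤ iN := by exact_mod_cast hi1
  have hiNL : iN < LN := by exact_mod_cast hiL
  rw [PySem.Int.mod_natCast]
  by_cases hdvd : iN ∣ LN
  · rw [if_neg (by simp [Nat.mod_eq_zero_of_dvd hdvd])]
    have hfd : PySem.Int.floordiv (LN : Int) (iN : Int) = ((LN / iN : Nat) : Int) := by
      exact_mod_cast PySem.Int.floordiv_natCast LN iN
    rw [hfd, PySem.List.slice_to_natCast]
    have hsm : pvStrMul (s.take iN) ((LN / iN : Nat) : Int)
        = (List.replicate (LN / iN) (s.take iN)).flatten := by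
      rw [pvStrMul, Int.toNat_natCast]
    rw [hsm, beq_eq_false_iff_ne]
    intro heq
    have hr2 : 2 ≤ LN / iN := by
      obtain ⟨q, hq⟩ := hdvd
      have hq2 : q ≠ 0 ∧ q ≠ 1 := by constructor <;> rintro rfl <;> omega
      rw [hq, Nat.mul_div_cancel_left _ (by omega : 0 < iN)]
      omega
    have hs1 : s.count '-' = 1 := by
      rw [hsdef, List.count_cons]
      simp [hcnt]
    have htk : 1 ≤ (s.take iN).count '-' := by
      obtain ⟨h', hh'⟩ : ∃ h', iN = h' + 1 := ⟨iN - 1, by omega⟩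
      rw [hsdef, hh', List.take_succ_cons, List.count_cons]
      simp
    have hcount : s.count '-' = (LN / iN) * (s.take iN).count '-' := by
      conv_lhs => rw [heq]
      rw [pvCount_flattenRep]
    nlinarith
  · rw [if_pos]
    have hne : LN % iN ≠ 0 := fun h => hdvd (Nat.dvd_of_mod_eq_zero h)
    exact_mod_cast fun h => hne (by exact_mod_cast h)

theorem pvIsInvalid_iff (n : Int) : pvIsInvalid n = true ↔ pvGoodN false n := by
  rcases lt_trichotomy n 0 with hlt | rfl | hgt
  · rw [pvIsInvalid_neg n hlt]
    simp only [Bool.false_eq_true, false_iff]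
    intro h; have := pvGoodN_eleven_le h; omega
  · constructor
    · intro h; exact absurd h (by decide)
    · intro h; have := pvGoodN_eleven_le h; omega
  · obtain ⟨mN, rfl⟩ : ∃ mN : Nat, n = (mN : Int) := ⟨n.toNat, (Int.toNat_of_nonneg (by omega)).symm⟩
    exact pvIsInvalid_pos mN (by exact_mod_cast hgt)

theorem pvIsInvalidP2_iff (n : Int) : pvIsInvalidP2 n = true ↔ pvGoodN true n := by
  rcases lt_trichotomy n 0 with hlt | rfl | hgt
  · rw [pvIsInvalidP2_neg n hlt]
    simp only [Bool.false_eq_true, false_iff]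
    intro h; have := pvGoodN_eleven_le h; omega
  · constructor
    · intro h; exact absurd h (by decide)
    · intro h; have := pvGoodN_eleven_le h; omega
  · obtain ⟨mN, rfl⟩ : ∃ mN : Nat, n = (mN : Int) := ⟨n.toNat, (Int.toNat_of_nonneg (by omega)).symm⟩
    exact pvIsInvalidP2_pos mN (by exact_mod_cast hgt)

theorem pvRepMult_cast (d m : Int) (hd : 0 ≤ d) :
    pvRepMult d m = ((pvRepu d.toNat m.toNat : Nat) : Int) := by
  rw [pvRepMult, pvRepu, PySem.List.pyRange_one, Nat.cast_list_sum, List.map_map, List.map_map]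
  have hm0 : ((m : Int) - 0).toNat = m.toNat := by omega
  rw [hm0]
  apply congrArg
  apply List.map_congr_left
  intro k _
  simp only [Function.comp_apply]
  have h1 : (d * ((0:Int) + (k : Int))).toNat = d.toNat * k := by
    rw [Int.zero_add, Int.toNat_mul hd (by omega), Int.toNat_natCast]
  rw [h1]
  push_cast
  ring

theorem pvFoldMem {α β : Type} [BEq β] [LawfulBEq β] (l : List α)
    (step : PySem.Set β → α → PySem.Set β) (Q : α → β → Prop)
    (hstep : ∀ s x y, y ∈ step s x ↔ y ∈ s ∨ Q x y) :
    ∀ (s0 : PySem.Set β) (y : β), y ∈ l.foldl step s0 ↔ y ∈ s0 ∨ ∃ x ∈ l, Q x y := by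
  induction l with
  | nil => simp
  | cons a t ih =>
    intro s0 y
    rw [List.foldl_cons, ih, hstep]
    constructor
    · rintro ((h | h) | ⟨x, hx, hq⟩)
      · exact Or.inl h
      · exact Or.inr ⟨a, List.mem_cons_self, h⟩
      · exact Or.inr ⟨x, List.mem_cons_of_mem a hx, hq⟩
    · rintro (h | ⟨x, hx, hq⟩)
      · exact Or.inl (Or.inl h)
      · rcases List.mem_cons.mp hx with rfl | hx
        · exact Or.inl (Or.inr hq)
        · exact Or.inr ⟨x, hx, hq⟩

theorem pvFoldNodup {α β : Type} (l : List α)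
    (step : PySem.Set β → α → PySem.Set β)
    (hstep : ∀ s x, s.Nodup → (step s x).Nodup) :
    ∀ (s0 : PySem.Set β), s0.Nodup → (l.foldl step s0).Nodup := by
  induction l with
  | nil => intro s0 h; exact h
  | cons a t ih => intro s0 h; exact ih _ (hstep s0 a h)

-- the set built by B
def pvFound (start stop : Int) (part2 : Bool) : PySem.Set Int :=
  if 10 ≤ stop then
    let topLen := PySem.Chars.len (PySem.Int.toChars stop)
    (PySem.List.pyRange 2 (topLen + 1) 1).foldl (fun f length =>
      (PySem.List.pyRange 1 length 1).foldl (fun f d =>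
        if PySem.Int.mod length d ≠ 0 then f
        else if !part2 && length ≠ 2 * d then f
        else
          let reps := PySem.Int.floordiv length d
          let mult := pvRepMult d reps
          (PySem.List.pyRange ((10 : Int) ^ (d - 1).toNat) ((10 : Int) ^ d.toNat) 1).foldl
            (fun f c =>
              if start ≤ c * mult ∧ c * mult ≤ stop then PySem.Set.add f (c * mult) else f) f) f)
      PySem.Set.empty
  else PySem.Set.empty

def pvQd (start stop : Int) (part2 : Bool) (length : Int) (d v : Int) : Prop :=
  PySem.Int.mod length d = 0 ∧ (part2 = true ∨ length = 2 * d) ∧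
  ∃ c ∈ PySem.List.pyRange ((10 : Int) ^ (d - 1).toNat) ((10 : Int) ^ d.toNat) 1,
    (start ≤ c * pvRepMult d (PySem.Int.floordiv length d) ∧
      c * pvRepMult d (PySem.Int.floordiv length d) ≤ stop) ∧
    v = c * pvRepMult d (PySem.Int.floordiv length d)

theorem pvFound_nodup (start stop : Int) (part2 : Bool) : (pvFound start stop part2).Nodup := by
  rw [pvFound]
  split
  · apply pvFoldNodup _ _ ?_ _ List.nodup_nil
    intro s x hs
    apply pvFoldNodup _ _ ?_ _ hs
    intro s' x' hs'
    split
    · exact hs'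
    split
    · exact hs'
    apply pvFoldNodup _ _ ?_ _ hs'
    intro s'' x'' hs''
    split
    · exact PySem.Set.nodup_add _ _ hs''
    · exact hs''
  · exact List.nodup_nil

theorem pvFound_mem_raw (start stop : Int) (part2 : Bool) (v : Int) :
    v ∈ pvFound start stop part2 ↔
      (10 ≤ stop ∧ ∃ length ∈ PySem.List.pyRange 2 (PySem.Chars.len (PySem.Int.toChars stop) + 1) 1,
        ∃ d ∈ PySem.List.pyRange 1 length 1, pvQd start stop part2 length d v) := by
  rw [pvFound]
  split
  case isTrue h =>
    rw [pvFoldMem _ _ (fun length v => ∃ d ∈ PySem.List.pyRange 1 length 1,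
        pvQd start stop part2 length d v) ?_ _ v]
    · simp only [PySem.Set.empty]
      constructor
      · rintro (hfalse | hx)
        · simp at hfalse
        · exact ⟨h, hx⟩
      · rintro ⟨_, hx⟩
        exact Or.inr hx
    · intro s length y
      rw [pvFoldMem _ _ (fun d v => pvQd start stop part2 length d v) ?_ _ y]
      intro s' d y'
      simp only [pvQd]
      split
      case isTrue hg1 =>
        constructor
        · exact Or.inl
        · rintro (hy | ⟨hmod, _⟩)
          · exact hy
          · exact absurd hmod hg1
      case isFalse hg1 =>
        split
        case isTrue hg2 =>
          constructor
          · exact Or.inl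
          · rintro (hy | ⟨_, hor, _⟩)
            · exact hy
            · simp only [Bool.not_eq_eq_eq_not, Bool.not_true, ne_eq, Bool.and_eq_true,
                decide_eq_true_eq] at hg2
              rcases hor with hp | hl
              · rw [hg2.1] at hp; exact absurd hp (by simp)
              · exact absurd hl hg2.2
        case isFalse hg2 =>
          rw [pvFoldMem _ _ (fun c v => (start ≤ c * pvRepMult d (PySem.Int.floordiv length d) ∧
              c * pvRepMult d (PySem.Int.floordiv length d) ≤ stop) ∧
              v = c * pvRepMult d (PySem.Int.floordiv length d)) ?_ _ y']
          · constructor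
            · rintro (hy | ⟨c, hc, hq⟩)
              · exact Or.inl hy
              · refine Or.inr ⟨?_, ?_, c, hc, hq⟩
                · simp only [ne_eq, not_not] at hg1; exact hg1
                · by_cases hp : part2 = true
                  · exact Or.inl hp
                  · have hpf : part2 = false := by revert hp; cases part2 <;> simp
                    subst hpf
                    simp at hg2
                    exact Or.inr hg2
            · rintro (hy | ⟨_, _, c, hc, hq⟩)
              · exact Or.inl hy
              · exact Or.inr ⟨c, hc, hq⟩
          · intro s'' c y''
            split
            case isTrue hcond => rw [PySem.Set.mem_add]; tauto
            case isFalse hcond =>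
              constructor
              · exact Or.inl
              · rintro (hy | ⟨hb, hv⟩)
                · exact hy
                · exact absurd hb (by rw [← hv] at hcond ⊢; exact fun hb' => hcond ⟨hb'.1, hb'.2⟩)
  case isFalse h =>
    simp only [PySem.Set.empty, List.not_mem_nil, false_iff, not_and]
    intro h'; exact absurd h' h

theorem pvToChars_pos (n : Int) (hn : 0 < n) :
    PySem.Int.toChars n = ((Nat.digits 10 n.toNat).map Nat.digitChar).reverse := by
  rw [PySem.Int.toChars, if_neg (by omega)]
  exact pvToDigits_eq (by omega)

theorem pvFound_iff (start stop : Int) (part2 : Bool) (v : Int) :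
    v ∈ pvFound start stop part2 ↔ start ≤ v ∧ v ≤ stop ∧ pvGoodN part2 v := by
  rw [pvFound_mem_raw]
  constructor
  · rintro ⟨hstop, length, hlenmem, d, hdmem, hmod, hor, c, hcmem, ⟨hb1, hb2⟩, hveq⟩
    obtain ⟨hlen2, hlentop⟩ := PySem.List.mem_pyRange_one.mp hlenmem
    obtain ⟨hd1, hdlen⟩ := PySem.List.mem_pyRange_one.mp hdmem
    obtain ⟨hc1, hc2⟩ := PySem.List.mem_pyRange_one.mp hcmem
    obtain ⟨dN, rfl⟩ : ∃ dN : Nat, d = (dN : Int) := ⟨d.toNat, (Int.toNat_of_nonneg (by omega)).symm⟩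
    obtain ⟨LN, rfl⟩ : ∃ LN : Nat, length = (LN : Int) :=
      ⟨length.toNat, (Int.toNat_of_nonneg (by omega)).symm⟩
    have hdN1 : 1 ≤ dN := by exact_mod_cast hd1
    have hdNL : dN < LN := by exact_mod_cast hdlen
    have hLN2 : 2 ≤ LN := by exact_mod_cast hlen2
    have hdvd : dN ∣ LN := by
      rw [PySem.Int.mod_natCast] at hmod
      exact Nat.dvd_of_mod_eq_zero (by exact_mod_cast hmod)
    have hfd : PySem.Int.floordiv (LN : Int) (dN : Int) = ((LN / dN : Nat) : Int) :=
      PySem.Int.floordiv_natCast LN dN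
    rw [hfd, pvRepMult_cast _ _ (by omega)] at hveq hb1 hb2
    simp only [Int.toNat_natCast] at hveq hb1 hb2
    have hr2 : 2 ≤ LN / dN := by
      obtain ⟨q, hq⟩ := hdvd
      have hq2 : q ≠ 0 ∧ q ≠ 1 := by constructor <;> rintro rfl <;> omega
      rw [hq, Nat.mul_div_cancel_left _ (by omega : 0 < dN)]
      omega
    have hd1N : ((dN : Int) - 1).toNat = dN - 1 := by omega
    rw [hd1N] at hc1
    have hc0 : 0 < c := by
      have : (0:Int) < 10 ^ (dN - 1) := by positivity
      omega
    obtain ⟨cN, rfl⟩ : ∃ cN : Nat, c = (cN : Int) := ⟨c.toNat, (Int.toNat_of_nonneg (by omega)).symm⟩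
    have hcb1 : 10 ^ (dN - 1) ≤ cN := by exact_mod_cast hc1
    have hcb2 : cN < 10 ^ dN := by
      have : (cN : Int) < (10:Int) ^ (dN : Int).toNat := hc2
      rw [Int.toNat_natCast] at this
      exact_mod_cast this
    have hvN : v = ((cN * pvRepu dN (LN / dN) : Nat) : Int) := by
      rw [hveq]; push_cast; ring
    have hgood : pvGoodN part2 v := by
      rw [hvN]
      refine ⟨dN, LN / dN, cN, hdN1, hr2, ?_, hcb1, hcb2, rfl⟩
      intro hp
      have hl2d : (LN : Int) = 2 * (dN : Int) := by
        rcases hor with hp' | hl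
        · rw [hp] at hp'; exact absurd hp' (by simp)
        · exact hl
      have : LN = 2 * dN := by exact_mod_cast hl2d
      rw [this, Nat.mul_div_assoc 2 (dvd_refl dN), Nat.div_self (by omega : 0 < dN), Nat.mul_one]
    exact ⟨by rw [← hveq] at hb1; exact hb1, by rw [← hveq] at hb2; exact hb2, hgood⟩
  · rintro ⟨hv1, hv2, hgood⟩
    have h11 : 11 ≤ v := pvGoodN_eleven_le hgood
    have hstop : 10 ≤ stop := by omega
    obtain ⟨vN, rfl⟩ : ∃ vN : Nat, v = (vN : Int) := ⟨v.toNat, (Int.toNat_of_nonneg (by omega)).symm⟩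
    obtain ⟨d, r, c, hd1, hr2, hp, hclen, hmeq, hvlen⟩ := pvGoodN_nat hgood
    have hstopN : (10:Nat) ≤ stop.toNat := by omega
    have htop : PySem.Chars.len (PySem.Int.toChars stop) = ((Nat.digits 10 stop.toNat).length : Int) := by
      rw [pvToChars_pos stop (by omega), PySem.Chars.len_eq]
      simp
    refine ⟨hstop, ((d * r : Nat) : Int), ?_, (d : Int), ?_, ?_, ?_, (c : Int), ?_, ⟨?_, ?_⟩, ?_⟩
    · rw [htop]
      refine PySem.List.mem_pyRange_one.mpr ⟨?_, ?_⟩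
      · have : 2 ≤ d * r := by nlinarith
        exact_mod_cast this
      · have hmono : (Nat.digits 10 vN).length ≤ (Nat.digits 10 stop.toNat).length :=
          Nat.le_length_digits_le 10 vN stop.toNat (by omega)
        rw [hvlen] at hmono
        have hle : (d * r : Nat) ≤ (Nat.digits 10 stop.toNat).length := by
          rw [Nat.mul_comm]; exact hmono
        have : ((d * r : Nat) : Int) ≤ ((Nat.digits 10 stop.toNat).length : Int) := by
          exact_mod_cast hle
        omega
    · refine PySem.List.mem_pyRange_one.mpr ⟨by exact_mod_cast hd1, ?_⟩
      have : d < d * r := by nlinarith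
      exact_mod_cast this
    · have : (d * r) % d = 0 := Nat.mod_eq_zero_of_dvd (Dvd.intro r rfl)
      rw [PySem.Int.mod_natCast]
      exact_mod_cast this
    · by_cases hpt : part2 = true
      · exact Or.inl hpt
      · have hpf : part2 = false := by revert hpt; cases part2 <;> simp
        have hr2' : r = 2 := hp hpf
        subst hr2'
        right
        push_cast
        ring
    · refine PySem.List.mem_pyRange_one.mpr ⟨?_, ?_⟩
      · have h1 : ((d:Int) - 1).toNat = d - 1 := by omega
        rw [h1]
        have := (pvLenIff c d hd1).mp hclen
        exact_mod_cast this.1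
      · rw [Int.toNat_natCast]
        have := (pvLenIff c d hd1).mp hclen
        exact_mod_cast this.2
    all_goals {
      have hfd : PySem.Int.floordiv ((d * r : Nat) : Int) (d : Int) = ((d * r / d : Nat) : Int) :=
        PySem.Int.floordiv_natCast (d * r) d
      have hdr : d * r / d = r := by
        rw [Nat.mul_comm, Nat.mul_div_assoc r (dvd_refl d), Nat.div_self (by omega : 0 < d),
          Nat.mul_one]
      rw [hfd, hdr, pvRepMult_cast _ _ (by omega)]
      simp only [Int.toNat_natCast]
      first
      | (rw [show ((c:Int) * ((pvRepu d r : Nat) : Int)) = ((vN : Int)) from ?_]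
         · assumption
         · rw [hmeq]; push_cast; ring)
      | (rw [hmeq]; push_cast; ring)
    }

theorem pvAlt_eq_sorted (start stop : Int) (part2 : Bool) :
    find_invalids_alt start stop part2
      = PySem.List.sorted (pvFound start stop part2) (fun x => x) false := rfl

theorem pvFindA_eq_filter (start stop : Int) (part2 : Bool) :
    find_invalids start stop part2 =
      (PySem.List.pyRange start (stop + 1) 1).filter
        (fun n => if part2 then pvIsInvalidP2 n else pvIsInvalid n) := by
  rw [find_invalids]
  have hfun : (fun (invalids : List Int) n =>
      if !part2 && pvIsInvalid n then invalids ++ [n]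
      else if part2 && pvIsInvalidP2 n then invalids ++ [n]
      else invalids)
      = (fun (acc : List Int) x =>
        if (fun n => if part2 then pvIsInvalidP2 n else pvIsInvalid n) x = true
        then acc ++ [(fun (y : Int) => y) x] else acc) := by
    funext acc n
    cases part2 <;> simp
  rw [hfun, PySem.List.foldl_append_if]
  simp

theorem pvMain (start stop : Int) (part2 : Bool) :
    find_invalids start stop part2 = find_invalids_alt start stop part2 := by
  rw [pvAlt_eq_sorted, pvFindA_eq_filter]
  apply (PySem.List.sorted_eq_of_perm_of_pairwise_lt _ _ _ ?_ ?_).symm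
  · -- permutation: both are nodup with the same members
    apply (List.perm_ext_iff_of_nodup ?_ (pvFound_nodup start stop part2)).mpr
    · intro v
      rw [List.mem_filter, pvFound_iff, PySem.List.mem_pyRange_one]
      constructor
      · rintro ⟨⟨hv1, hv2⟩, hcheck⟩
        refine ⟨hv1, by omega, ?_⟩
        cases part2
        · exact (pvIsInvalid_iff v).mp (by simpa using hcheck)
        · exact (pvIsInvalidP2_iff v).mp (by simpa using hcheck)
      · rintro ⟨hv1, hv2, hgood⟩
        refine ⟨⟨hv1, by omega⟩, ?_⟩
        cases part2
        · simpa using (pvIsInvalid_iff v).mpr hgood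
        · simpa using (pvIsInvalidP2_iff v).mpr hgood
    · exact (PySem.List.nodup_pyRange_one _ _).filter _
  · exact (PySem.List.pairwise_lt_pyRange_one _ _).filter _

-- ===== VERDICT (by name: the statement is the Claim_ definition above) =====
theorem find_invalids_spec : Claim_equal_find_invalids := by
  intro start stop part2 _
  show find_invalids start stop part2 = find_invalids_alt start stop part2
  exact pvMain start stop part2
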